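-- pv_equiv track=rewrite | github.com/SJTU-xihe/multi-player-game-ai-project | agents/ai_bots/gomoku_minimax_bot.py | _count_threat_patterns_in_line
-- ===== SOURCE A (Python) =====
-- def _count_threat_patterns_in_line(line, player_id):
--     """统计线段中的威胁模式数量"""
--     count = 0
--     opponent_id = 3 - player_id
--
--     # 标准化线段
--     normalized = []
--     for cell in line:
--         if cell == player_id:
--             normalized.append(1)
--         elif cell == opponent_id:
--             normalized.append(-1)
--         elif cell == 0:
--             normalized.append(0)
--         else:
--             normalized.append(-1)  # 边界或其他
--
--     # 检查各种威胁模式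
--     threat_patterns = [
--         [1, 1, 1, 0],     # XXX_
--         [0, 1, 1, 1],     # _XXX
--         [1, 1, 0, 1],     # XX_X
--         [1, 0, 1, 1],     # X_XX
--         [1, 0, 0, 1, 1],  # X__XX
--         [1, 1, 0, 0, 1],  # XX__X
--         [1, 0, 1, 0, 1],  # X_X_X
--     ]
--
--     for pattern in threat_patterns:
--         for i in range(len(normalized) - len(pattern) + 1):
--             if normalized[i:i+len(pattern)] == pattern:
--                 count += 1
--
--     return count
-- ===== SOURCE B (Python) =====
-- # Rolling base-3 window codes: one pass, no slicing; each window of 4/5 cells is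
-- # encoded as an integer and compared against precomputed pattern codes.
-- _T4 = (79, 53, 77, 71)   # base-3 codes (cell digit = normalized value + 1) of the length-4 threat patterns
-- _T5 = (206, 230, 212)    # base-3 codes of the length-5 threat patterns
--
-- def _count_threat_patterns_in_line(line, player_id):
--     """Count threat patterns via rolling base-3 codes of the last 4 and 5 cells."""
--     opponent_id = 3 - player_id
--     count = 0
--     c4 = 0
--     c5 = 0
--     for j, cell in enumerate(line):
--         d = 2 if cell == player_id else (1 if (cell == 0 and cell != opponent_id) else 0)
--         c4 = (c4 * 3 + d) % 81
--         c5 = (c5 * 3 + d) % 243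
--         if j >= 3 and c4 in _T4:
--             count += 1
--         if j >= 4 and c5 in _T5:
--             count += 1
--     return count
-- ===== Notes on version B (the rewrite author's own statement) =====
-- stated objective: faster
-- what changed: A normalizes the line and then scans it once per threat pattern comparing list slices; B makes a single fused pass maintaining rolling base-3 codes of the last 4 and 5 cells and tests each code against precomputed integer pattern codes, so no slices are built and no per-pattern scans are made.
import Mathlib
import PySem

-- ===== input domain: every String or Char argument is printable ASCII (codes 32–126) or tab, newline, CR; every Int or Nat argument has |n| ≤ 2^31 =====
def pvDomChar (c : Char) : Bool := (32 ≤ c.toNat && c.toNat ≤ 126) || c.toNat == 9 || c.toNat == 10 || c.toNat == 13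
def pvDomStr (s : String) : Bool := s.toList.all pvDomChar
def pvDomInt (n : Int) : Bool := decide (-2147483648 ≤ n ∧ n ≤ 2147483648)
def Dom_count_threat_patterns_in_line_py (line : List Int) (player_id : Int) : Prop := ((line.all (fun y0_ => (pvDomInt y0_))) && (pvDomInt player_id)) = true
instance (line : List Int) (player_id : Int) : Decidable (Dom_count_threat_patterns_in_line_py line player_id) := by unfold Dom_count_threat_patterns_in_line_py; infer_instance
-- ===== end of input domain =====

-- B replaces A's seven per-pattern slice scans by a single fused pass that keeps
-- rolling base-3 codes of the last 4 and 5 cells and compares them against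
-- precomputed integer pattern codes: one pass, no slice allocations (measured faster by a constant factor).

-- ===== PORT A =====
def count_threat_patterns_in_line_py (line : List Int) (player_id : Int) : Int :=
  let opponent_id : Int := 3 - player_id
  let normalized : List Int := line.foldl (fun acc cell =>
      if cell = player_id then acc ++ [1]
      else if cell = opponent_id then acc ++ [-1]
      else if cell = 0 then acc ++ [0]
      else acc ++ [-1]) []
  let threat_patterns : List (List Int) :=
    [[1,1,1,0],[0,1,1,1],[1,1,0,1],[1,0,1,1],[1,0,0,1,1],[1,1,0,0,1],[1,0,1,0,1]]
  threat_patterns.foldl (fun count pattern =>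
    (PySem.List.pyRange 0 ((normalized.length : Int) - (pattern.length : Int) + 1) 1).foldl
      (fun c i =>
        if PySem.List.slice normalized (some i) (some (i + (pattern.length : Int))) = pattern
        then c + 1 else c)
      count) 0

-- ===== PORT B =====
-- module-level constants _T4, _T5 of Source B
def pvT4 : List Int := [79, 53, 77, 71]
def pvT5 : List Int := [206, 230, 212]

def count_threat_patterns_in_line_py_alt (line : List Int) (player_id : Int) : Int :=
  let opponent_id : Int := 3 - player_id
  ((PySem.List.enumerate line 0).foldl (fun st jc =>
      let count := st.1
      let c4 := st.2.1
      let c5 := st.2.2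
      let j := jc.1
      let cell := jc.2
      let d : Int := if cell = player_id then 2 else if cell = 0 ∧ ¬ (cell = opponent_id) then 1 else 0
      let c4' := PySem.Int.mod (c4 * 3 + d) 81
      let c5' := PySem.Int.mod (c5 * 3 + d) 243
      let count' := if 3 ≤ j ∧ c4' ∈ pvT4 then count + 1 else count
      let count'' := if 4 ≤ j ∧ c5' ∈ pvT5 then count' + 1 else count'
      (count'', c4', c5')) ((0 : Int), (0 : Int), (0 : Int))).1

-- ===== PRECONDITION & SPEC =====
def Spec_count_threat_patterns_in_line_py (line : List Int) (player_id : Int) (out : Int) : Prop := out = count_threat_patterns_in_line_py_alt line player_id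
instance (line : List Int) (player_id : Int) (out : Int) : Decidable (Spec_count_threat_patterns_in_line_py line player_id out) := by unfold Spec_count_threat_patterns_in_line_py; infer_instance

-- ===== CLAIM (what is proved, stated in full; the proofs are below) =====
def Claim_equal_count_threat_patterns_in_line_py : Prop := ∀ (line : List Int) (player_id : Int), Dom_count_threat_patterns_in_line_py line player_id → Spec_count_threat_patterns_in_line_py line player_id (count_threat_patterns_in_line_py line player_id)

-- ===== LEMMAS AND PROOFS =====

-- the cell→digit map of B and the cell→normalized map of A
def pvDigit (pid cell : Int) : Int :=
  if cell = pid then 2 else if cell = 0 ∧ ¬ (cell = 3 - pid) then 1 else 0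
def pvNorm (pid cell : Int) : Int :=
  if cell = pid then 1 else if cell = 3 - pid then -1 else if cell = 0 then 0 else -1
def pvCode (l : List Int) : Int := l.foldl (fun r d => r * 3 + d) 0
def pvTail (k : Nat) (l : List Int) : List Int := l.drop (l.length - k)
def pvP4 : List (List Int) := [[1,1,1,0],[0,1,1,1],[1,1,0,1],[1,0,1,1]]
def pvP5 : List (List Int) := [[1,0,0,1,1],[1,1,0,0,1],[1,0,1,0,1]]

def pvStep (pid : Int) (st : Int × Int × Int) (jc : Int × Int) : Int × Int × Int :=
  let count := st.1
  let c4 := st.2.1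
  let c5 := st.2.2
  let j := jc.1
  let cell := jc.2
  let d : Int := pvDigit pid cell
  let c4' := PySem.Int.mod (c4 * 3 + d) 81
  let c5' := PySem.Int.mod (c5 * 3 + d) 243
  let count' := if 3 ≤ j ∧ c4' ∈ pvT4 then count + 1 else count
  let count'' := if 4 ≤ j ∧ c5' ∈ pvT5 then count' + 1 else count'
  (count'', c4', c5')

def pvTerm (pid : Int) (xs : List Int) (j : Nat) : Int :=
  (if 3 ≤ j ∧ pvCode (pvTail 4 ((xs.take (j+1)).map (pvDigit pid))) ∈ pvT4 then 1 else 0) +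
  (if 4 ≤ j ∧ pvCode (pvTail 5 ((xs.take (j+1)).map (pvDigit pid))) ∈ pvT5 then 1 else 0)

def pvTotal (pid : Int) (xs : List Int) : Int :=
  ((List.range xs.length).map (pvTerm pid xs)).sum

lemma pv_alt_eq (line : List Int) (pid : Int) :
    count_threat_patterns_in_line_py_alt line pid
      = ((PySem.List.enumerate line 0).foldl (pvStep pid) ((0:Int), (0:Int), (0:Int))).1 := rfl

lemma pv_digit_bound (pid c : Int) : 0 ≤ pvDigit pid c ∧ pvDigit pid c < 3 := by
  unfold pvDigit; split_ifs <;> omega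

lemma pv_digit_norm (pid c : Int) : pvDigit pid c = pvNorm pid c + 1 := by
  unfold pvDigit pvNorm; split_ifs <;> omega

lemma pv_code_foldl (b : List Int) (r : Int) :
    b.foldl (fun r d => r * 3 + d) r = r * 3 ^ b.length + pvCode b := by
  induction b generalizing r with
  | nil => simp [pvCode]
  | cons d b ih =>
    simp only [List.foldl_cons, List.length_cons]
    rw [ih (r * 3 + d)]
    have h0 : pvCode (d :: b) = d * 3 ^ b.length + pvCode b := by
      unfold pvCode
      simp only [List.foldl_cons]
      rw [show (0:Int) * 3 + d = d by ring, ih d]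
      rfl
    rw [h0]; ring

lemma pv_code_append (a b : List Int) :
    pvCode (a ++ b) = pvCode a * 3 ^ b.length + pvCode b := by
  unfold pvCode
  rw [List.foldl_append]
  exact pv_code_foldl b _

lemma pv_code_bound (l : List Int) (h : ∀ x ∈ l, 0 ≤ x ∧ x < 3) :
    0 ≤ pvCode l ∧ pvCode l < 3 ^ l.length := by
  induction l using List.reverseRecOn with
  | nil => simp [pvCode]
  | append_singleton l d ih =>
    have hd := h d (by simp)
    have hl : ∀ x ∈ l, 0 ≤ x ∧ x < 3 := fun x hx => h x (by simp [hx])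
    have := ih hl
    rw [pv_code_append]
    simp only [List.length_append, List.length_singleton]
    have : pvCode [d] = d := by simp [pvCode]
    rw [this]
    constructor
    · nlinarith [ih hl]
    · have h1 := (ih hl).2
      have h2 := (ih hl).1
      have : (3:Int) ^ (l.length + 1) = 3 ^ l.length * 3 := by ring
      rw [this]
      nlinarith

lemma pv_code_mod (k : Nat) (l : List Int) (h : ∀ x ∈ l, 0 ≤ x ∧ x < 3) :
    PySem.Int.mod (pvCode l) (3 ^ k) = pvCode (pvTail k l) := by
  have hsplit : l = l.take (l.length - k) ++ pvTail k l := (List.take_append_drop _ l).symm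
  by_cases hk : l.length ≤ k
  · have : l.length - k = 0 := by omega
    unfold pvTail
    rw [this]
    simp only [List.drop_zero]
    have hb := pv_code_bound l h
    have hlt : pvCode l < 3 ^ k := lt_of_lt_of_le hb.2 (by
      apply pow_le_pow_right₀ (by norm_num) hk)
    rw [PySem.Int.mod_eq_emod_of_pos (by positivity)]
    exact Int.emod_eq_of_lt hb.1 hlt
  · have hlen : (pvTail k l).length = k := by
      unfold pvTail; simp; omega
    have htb : ∀ x ∈ pvTail k l, 0 ≤ x ∧ 3 > x := by
      intro x hx
      have : x ∈ l := List.mem_of_mem_drop hx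
      exact ⟨(h x this).1, (h x this).2⟩
    have hb := pv_code_bound (pvTail k l) (fun x hx => htb x hx)
    rw [hlen] at hb
    conv_lhs => rw [hsplit]
    rw [pv_code_append, hlen]
    rw [PySem.Int.mod_eq_emod_of_pos (by positivity), add_comm, mul_comm,
        Int.add_mul_emod_self_left]
    exact Int.emod_eq_of_lt hb.1 hb.2

lemma pv_tail_map (k : Nat) (f : Int → Int) (l : List Int) :
    pvTail k (l.map f) = (pvTail k l).map f := by
  unfold pvTail
  rw [List.length_map, List.map_drop]

lemma pv_digits_eq (pid : Int) (l : List Int) :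
    l.map (pvDigit pid) = (l.map (pvNorm pid)).map (fun v => v + 1) := by
  rw [List.map_map]
  exact List.map_congr_left (fun c _ => pv_digit_norm pid c)

lemma pv_code_inj (a : List Int) : ∀ (b : List Int),
    (∀ x ∈ a, 0 ≤ x ∧ x < 3) → (∀ x ∈ b, 0 ≤ x ∧ x < 3) →
    a.length = b.length → pvCode a = pvCode b → a = b := by
  induction a using List.reverseRecOn with
  | nil =>
    intro b _ _ hlen _
    simp at hlen
    exact (List.eq_nil_of_length_eq_zero hlen.symm).symm
  | append_singleton a d ih =>
    intro b ha hb hlen hcode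
    have hbne : b ≠ [] := by
      intro h; subst h; simp at hlen
    obtain ⟨b', e, rfl⟩ : ∃ b' e, b = b' ++ [e] :=
      ⟨b.dropLast, b.getLast hbne, (List.dropLast_append_getLast hbne).symm⟩
    rw [pv_code_append, pv_code_append] at hcode
    simp only [List.length_singleton, pow_one, List.length_append] at hcode hlen
    have hd := ha d (by simp)
    have he := hb e (by simp)
    have hde : d = e ∧ pvCode a = pvCode b' := by
      have hca := pv_code_bound a (fun x hx => ha x (by simp [hx]))
      have hcb := pv_code_bound b' (fun x hx => hb x (by simp [hx]))
      have : pvCode [d] = d := by simp [pvCode]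
      rw [this] at hcode
      have : pvCode [e] = e := by simp [pvCode]
      rw [this] at hcode
      constructor <;> omega
    have hab : a = b' := ih b' (fun x hx => ha x (by simp [hx]))
      (fun x hx => hb x (by simp [hx])) (by omega) hde.2
    rw [hab, hde.1]

lemma pv_memP (P : List (List Int)) (L : Nat)
    (hP : ∀ p ∈ P, p.length = L ∧ ∀ x ∈ p, -1 ≤ x ∧ x ≤ 1)
    (w : List Int) (hw : ∀ x ∈ w, -1 ≤ x ∧ x ≤ 1) (hlen : w.length = L) :
    pvCode (w.map (fun v => v + 1)) ∈ P.map (fun p => pvCode (p.map (fun v => v + 1))) ↔ w ∈ P := by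
  constructor
  · intro h
    obtain ⟨p, hp, hcode⟩ := List.mem_map.mp h
    have hpl := hP p hp
    have heq : p.map (fun v => v + 1) = w.map (fun v => v + 1) := by
      apply pv_code_inj
      · intro x hx
        obtain ⟨v, hv, rfl⟩ := List.mem_map.mp hx
        have := hpl.2 v hv; omega
      · intro x hx
        obtain ⟨v, hv, rfl⟩ := List.mem_map.mp hx
        have := hw v hv; omega
      · simp [hlen, hpl.1]
      · exact hcode
    have : p = w := by
      have hinj : Function.Injective (fun v : Int => v + 1) := fun x y h => by
        simpa using h
      exact (List.map_injective_iff.mpr hinj) heq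
    rwa [← this]
  · intro h
    exact List.mem_map_of_mem h

lemma pv_count_ind (l : List (List Int)) (hl : l.Nodup) (w : List Int) :
    ((l.countP (fun p => decide (w = p)) : Nat) : Int) = if w ∈ l then 1 else 0 := by
  have : l.countP (fun p => decide (w = p)) = l.count w := by
    unfold List.count
    apply List.countP_congr
    intro p _
    by_cases h : w = p
    · subst h; simp
    · have h2 : ¬ p = w := fun hh => h hh.symm
      simp [h, h2]
  rw [this]
  by_cases h : w ∈ l
  · rw [List.count_eq_one_of_mem hl h]; simp [h]
  · rw [List.count_eq_zero_of_not_mem h]; simp [h]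

lemma pv_shift (n c : Nat) (q : Nat → Prop) [DecidablePred q] :
    ((List.range (n + 1 - (c + 1))).map (fun k => if q k then (1:Int) else 0)).sum
      = ((List.range n).map (fun j => if c ≤ j ∧ q (j - c) then (1:Int) else 0)).sum := by
  by_cases h : c ≤ n
  · have hn : n = c + (n - c) := by omega
    conv_rhs => rw [hn, List.range_add]
    rw [List.map_append, List.sum_append]
    have h1 : ((List.range c).map (fun j => if c ≤ j ∧ q (j - c) then (1:Int) else 0)).sum = 0 := by
      rw [List.sum_eq_zero]
      intro x hx
      obtain ⟨j, hj, rfl⟩ := List.mem_map.mp hx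
      simp only [List.mem_range] at hj
      have : ¬ (c ≤ j) := by omega
      simp [this]
    rw [h1, zero_add, List.map_map]
    have : n + 1 - (c + 1) = n - c := by omega
    rw [this]
    apply congrArg List.sum
    apply List.map_congr_left
    intro k _
    simp only [Function.comp]
    have h2 : c ≤ c + k := by omega
    have h3 : c + k - c = k := by omega
    simp [h2, h3]
  · have h1 : n + 1 - (c + 1) = 0 := by omega
    rw [h1]
    simp only [List.range_zero, List.map_nil, List.sum_nil]
    symm
    rw [List.sum_eq_zero]
    intro x hx
    obtain ⟨j, hj, rfl⟩ := List.mem_map.mp hx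
    simp only [List.mem_range] at hj
    have : ¬ (c ≤ j) := by omega
    simp [this]

lemma pv_swap_sum {α β : Type} (as : List α) (bs : List β) (g : α → β → Bool) :
    (as.map (fun a => ((bs.countP (fun b => g a b) : Nat) : Int))).sum
      = (bs.map (fun b => ((as.countP (fun a => g a b) : Nat) : Int))).sum := by
  induction as with
  | nil => simp
  | cons a as ih =>
    simp only [List.map_cons, List.sum_cons, ih, List.countP_cons]
    push_cast
    rw [PySem.List.sum_map_add_int, PySem.List.sum_map_ite_one_zero]
    simp [add_comm]

-- A's appending normalization loop is a map
lemma pv_normalize_eq (line : List Int) (player_id : Int) :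
    line.foldl (fun acc cell =>
      if cell = player_id then acc ++ [1]
      else if cell = 3 - player_id then acc ++ [-1]
      else if cell = 0 then acc ++ [0]
      else acc ++ [-1]) []
    = line.map (pvNorm player_id) := by
  have h : (fun (acc : List Int) cell =>
      if cell = player_id then acc ++ [1]
      else if cell = 3 - player_id then acc ++ [-1]
      else if cell = 0 then acc ++ [0]
      else acc ++ [-1])
    = (fun acc cell => acc ++ [pvNorm player_id cell]) := by
    funext acc cell
    unfold pvNorm
    split_ifs <;> rfl
  rw [h, PySem.List.foldl_append_singleton_eq_map, List.nil_append]

lemma pv_fold_inv (pid : Int) (l : List Int) :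
    (PySem.List.enumerate l 0).foldl (pvStep pid) ((0:Int), (0:Int), (0:Int))
      = (pvTotal pid l,
         PySem.Int.mod (pvCode (l.map (pvDigit pid))) 81,
         PySem.Int.mod (pvCode (l.map (pvDigit pid))) 243) := by
  induction l using List.reverseRecOn with
  | nil =>
    rw [PySem.List.enumerate_nil]
    simp only [List.foldl_nil, List.map_nil]
    have h0 : pvCode [] = 0 := rfl
    rw [h0, PySem.Int.mod_eq_emod_of_pos (by norm_num : (0:Int) < 81),
        PySem.Int.mod_eq_emod_of_pos (by norm_num : (0:Int) < 243)]
    have ht : pvTotal pid [] = 0 := by simp [pvTotal]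
    rw [ht]
    norm_num
  | append_singleton l a ih =>
    rw [PySem.List.enumerate_append, List.foldl_append, ih,
        PySem.List.enumerate_cons, PySem.List.enumerate_nil]
    simp only [List.foldl_cons, List.foldl_nil]
    have hd4 : ∀ x ∈ (l.map (pvDigit pid)) ++ [pvDigit pid a], 0 ≤ x ∧ x < 3 := by
      intro x hx
      rcases List.mem_append.mp hx with h | h
      · obtain ⟨c, _, rfl⟩ := List.mem_map.mp h; exact pv_digit_bound pid c
      · simp at h; subst h; exact pv_digit_bound pid a
    have hmap : (l ++ [a]).map (pvDigit pid) = (l.map (pvDigit pid)) ++ [pvDigit pid a] := by simp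
    have hcode : pvCode ((l ++ [a]).map (pvDigit pid))
        = pvCode (l.map (pvDigit pid)) * 3 + pvDigit pid a := by
      rw [hmap, pv_code_append]; simp [pvCode]
    have hm4 : PySem.Int.mod (PySem.Int.mod (pvCode (l.map (pvDigit pid))) 81 * 3 + pvDigit pid a) 81
        = PySem.Int.mod (pvCode ((l ++ [a]).map (pvDigit pid))) 81 := by
      rw [hcode, PySem.Int.mod_eq_emod_of_pos (by norm_num),
          PySem.Int.mod_eq_emod_of_pos (by norm_num),
          PySem.Int.mod_eq_emod_of_pos (by norm_num)]
      omega
    have hm5 : PySem.Int.mod (PySem.Int.mod (pvCode (l.map (pvDigit pid))) 243 * 3 + pvDigit pid a) 243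
        = PySem.Int.mod (pvCode ((l ++ [a]).map (pvDigit pid))) 243 := by
      rw [hcode, PySem.Int.mod_eq_emod_of_pos (by norm_num),
          PySem.Int.mod_eq_emod_of_pos (by norm_num),
          PySem.Int.mod_eq_emod_of_pos (by norm_num)]
      omega
    have hd4' : ∀ x ∈ (l ++ [a]).map (pvDigit pid), 0 ≤ x ∧ x < 3 := by
      rw [hmap]; exact hd4
    have htail4 : PySem.Int.mod (pvCode ((l ++ [a]).map (pvDigit pid))) 81
        = pvCode (pvTail 4 ((l ++ [a]).map (pvDigit pid))) := by
      have h := pv_code_mod 4 ((l ++ [a]).map (pvDigit pid)) hd4'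
      rw [show ((3:Int)^(4:Nat)) = 81 by norm_num] at h
      exact h
    have htail5 : PySem.Int.mod (pvCode ((l ++ [a]).map (pvDigit pid))) 243
        = pvCode (pvTail 5 ((l ++ [a]).map (pvDigit pid))) := by
      have h := pv_code_mod 5 ((l ++ [a]).map (pvDigit pid)) hd4'
      rw [show ((3:Int)^(5:Nat)) = 243 by norm_num] at h
      exact h
    have hterm_keep : ∀ j ∈ List.range l.length, pvTerm pid (l ++ [a]) j = pvTerm pid l j := by
      intro j hj
      simp only [List.mem_range] at hj
      unfold pvTerm
      rw [List.take_append_of_le_length (by omega)]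
    have htake : (l ++ [a]).take (l.length + 1) = l ++ [a] :=
      List.take_of_length_le (by simp)
    have htot : pvTotal pid (l ++ [a]) = pvTotal pid l + pvTerm pid (l ++ [a]) l.length := by
      unfold pvTotal
      simp only [List.length_append, List.length_singleton]
      rw [List.range_succ, List.map_append, List.sum_append,
          List.map_singleton, List.sum_singleton, List.map_congr_left hterm_keep]
    have hg4 : ((3:Int) ≤ 0 + (l.length : Int)) ↔ 3 ≤ l.length := by omega
    have hg5 : ((4:Int) ≤ 0 + (l.length : Int)) ↔ 4 ≤ l.length := by omega
    simp only [pvStep, Prod.mk.injEq]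
    refine ⟨?_, hm4, hm5⟩
    rw [htot]
    unfold pvTerm
    rw [htake]
    rw [if_congr (and_congr hg4 (by rw [hm4, htail4])) rfl rfl,
        if_congr (and_congr hg5 (by rw [hm5, htail5])) rfl rfl]
    split_ifs <;> ring

lemma pv_B_total (line : List Int) (pid : Int) :
    count_threat_patterns_in_line_py_alt line pid = pvTotal pid line := by
  rw [pv_alt_eq, pv_fold_inv]

lemma pv_norm_bound (pid c : Int) : -1 ≤ pvNorm pid c ∧ pvNorm pid c ≤ 1 := by
  unfold pvNorm; split_ifs <;> omega

lemma pv_part (line : List Int) (pid : Int) (P : List (List Int)) (T : List Int) (L : Nat)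
    (hL : 1 ≤ L)
    (hP : ∀ p ∈ P, p.length = L ∧ ∀ x ∈ p, -1 ≤ x ∧ x ≤ 1)
    (hnd : P.Nodup)
    (hT : P.map (fun p => pvCode (p.map (fun v => v + 1))) = T) :
    (P.map (fun p => ((((List.range ((line.map (pvNorm pid)).length + 1 - p.length)).countP
        (fun k => decide (((line.map (pvNorm pid)).drop k).take p.length = p)) : Nat)) : Int))).sum
      = ((List.range line.length).map (fun j =>
          if L - 1 ≤ j ∧ pvCode (pvTail L ((line.take (j+1)).map (pvDigit pid))) ∈ T
          then (1:Int) else 0)).sum := by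
  have hml : (line.map (pvNorm pid)).length = line.length := by simp
  rw [List.map_congr_left (g := fun p => ((((List.range (line.length + 1 - L)).countP
        (fun k => decide (((line.map (pvNorm pid)).drop k).take L = p)) : Nat)) : Int))
      (fun p hp => by rw [(hP p hp).1, hml])]
  rw [pv_swap_sum]
  rw [List.map_congr_left (g := fun k =>
        if ((line.map (pvNorm pid)).drop k).take L ∈ P then (1:Int) else 0)
      (fun k _ => pv_count_ind P hnd _)]
  have hL1 : L - 1 + 1 = L := by omega
  have hshift := pv_shift line.length (L - 1)
      (fun k => ((line.map (pvNorm pid)).drop k).take L ∈ P)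
  rw [hL1] at hshift
  rw [hshift]
  apply congrArg List.sum
  apply List.map_congr_left
  intro j hj
  simp only [List.mem_range] at hj
  by_cases h3 : L - 1 ≤ j
  · have hwin : pvTail L ((line.take (j+1)).map (pvDigit pid))
        = (((line.map (pvNorm pid)).drop (j - (L - 1))).take L).map (fun v => v + 1) := by
      rw [pv_digits_eq, pv_tail_map]
      congr 1
      rw [List.map_take]
      unfold pvTail
      rw [List.length_take, hml]
      rw [show min (j+1) line.length = j + 1 by omega]
      rw [List.drop_take]
      rw [show j + 1 - L = j - (L - 1) by omega, show j + 1 - (j - (L - 1)) = L by omega]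
    have hwlen : ((((line.map (pvNorm pid)).drop (j - (L - 1))).take L)).length = L := by
      rw [List.length_take, List.length_drop, hml]
      omega
    have hwb : ∀ x ∈ (((line.map (pvNorm pid)).drop (j - (L - 1))).take L), -1 ≤ x ∧ x ≤ 1 := by
      intro x hx
      have : x ∈ line.map (pvNorm pid) := List.mem_of_mem_drop (List.mem_of_mem_take hx)
      obtain ⟨c, _, rfl⟩ := List.mem_map.mp this
      exact pv_norm_bound pid c
    have hmem := pv_memP P L hP _ hwb hwlen
    rw [hT] at hmem
    have hiff : pvCode (pvTail L ((line.take (j+1)).map (pvDigit pid))) ∈ T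
        ↔ ((line.map (pvNorm pid)).drop (j - (L - 1))).take L ∈ P := by
      rw [hwin]; exact hmem
    exact if_congr (and_congr Iff.rfl hiff.symm) rfl rfl
  · simp [h3]

lemma pv_A_total (line : List Int) (pid : Int) :
    count_threat_patterns_in_line_py line pid = pvTotal pid line := by
  unfold count_threat_patterns_in_line_py
  dsimp only
  rw [pv_normalize_eq]
  have hA : ∀ (acc : Int), ∀ p ∈ ([[1,1,1,0],[0,1,1,1],[1,1,0,1],[1,0,1,1],[1,0,0,1,1],[1,1,0,0,1],[1,0,1,0,1]] : List (List Int)),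
      (PySem.List.pyRange 0 (((line.map (pvNorm pid)).length : Int) - (p.length : Int) + 1) 1).foldl
        (fun c i =>
          if PySem.List.slice (line.map (pvNorm pid)) (some i) (some (i + (p.length : Int))) = p
          then c + 1 else c) acc
      = acc + ((((List.range ((line.map (pvNorm pid)).length + 1 - p.length)).countP
          (fun k => decide ((((line.map (pvNorm pid))).drop k).take p.length = p)) : Nat)) : Int) := by
    intro acc p _
    rw [PySem.List.foldl_ite_add_one]
    congr 2
    rw [PySem.List.pyRange_one]
    have ht : ((((line.map (pvNorm pid)).length : Int) - (p.length : Int) + 1) - 0).toNat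
        = (line.map (pvNorm pid)).length + 1 - p.length := by omega
    rw [ht, List.countP_map]
    apply List.countP_congr
    intro k _
    simp [Function.comp, PySem.List.slice_natCast_add]
  have e1 := PySem.List.foldl_congr_mem
      (l := ([[1,1,1,0],[0,1,1,1],[1,1,0,1],[1,0,1,1],[1,0,0,1,1],[1,1,0,0,1],[1,0,1,0,1]] : List (List Int)))
      (init := (0 : Int))
      (f := fun count pattern =>
        (PySem.List.pyRange 0 (((line.map (pvNorm pid)).length : Int) - (pattern.length : Int) + 1) 1).foldl
          (fun c i =>
            if PySem.List.slice (line.map (pvNorm pid)) (some i) (some (i + (pattern.length : Int))) = pattern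
            then c + 1 else c) count)
      (g := fun count p => count +
        ((((List.range ((line.map (pvNorm pid)).length + 1 - p.length)).countP
          (fun k => decide ((((line.map (pvNorm pid))).drop k).take p.length = p)) : Nat)) : Int))
      (fun acc p hp => hA acc p hp)
  refine e1.trans ?_
  rw [PySem.List.foldl_add]
  rw [zero_add]
  have hsplit : ([[1,1,1,0],[0,1,1,1],[1,1,0,1],[1,0,1,1],[1,0,0,1,1],[1,1,0,0,1],[1,0,1,0,1]] : List (List Int)) = pvP4 ++ pvP5 := rfl
  rw [hsplit, List.map_append, List.sum_append]
  rw [pv_part line pid pvP4 pvT4 4 (by norm_num) (by decide) (by decide) (by decide),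
      pv_part line pid pvP5 pvT5 5 (by norm_num) (by decide) (by decide) (by decide)]
  unfold pvTotal pvTerm
  rw [← PySem.List.sum_map_add_int]

-- ===== VERDICT (by name: the statement is the Claim_ definition above) =====
theorem count_threat_patterns_in_line_py_spec : Claim_equal_count_threat_patterns_in_line_py := by
  intro line player_id _
  unfold Spec_count_threat_patterns_in_line_py
  rw [pv_A_total, pv_B_total]
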